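-- pv_equiv track=rewrite | github.com/Prithviraj03/Chess_AI_TL-ID-DL-MM | Joueur.py/games/chess/ai.py | get_valid_moves_for_queen
-- ===== SOURCE A (Python) =====
-- def get_valid_moves_for_queen(board, index):
--     """
--     Returns a list of valid moves for a queen on the board at the given index.
--
--     Args:
--         board (list): the current state of the board as a 1D array
--         index (int): the index of the queen on the board
--
--     Returns:
--         list: a list of valid moves for the given queen
--     """
--     valid_moves = []
--     color = board[index].isupper()
--
--     # Calculate the queen's current rank and file
--     rank = index // 8
--     file = index % 8
--
--     # Determine the direction of the queen's movement based on its color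
--     direction = -1 if color else 1
--
--     # Check valid moves in the horizontal direction
--     for i in range(file-1, -1, -1): # Check left
--         if board[rank*8 + i] == '':
--             valid_moves.append(rank*8 + i)
--         elif (color and board[rank*8 + i].islower()) or (not color and board[rank*8 + i].isupper()):
--             valid_moves.append(rank*8 + i)
--             break
--         else:
--             break
--     for i in range(file+1, 8): # Check right
--         if board[rank*8 + i] == '':
--             valid_moves.append(rank*8 + i)
--         elif (color and board[rank*8 + i].islower()) or (not color and board[rank*8 + i].isupper()):
--             valid_moves.append(rank*8 + i)
--             break
--         else:
--             break
--
--     # Check valid moves in the vertical direction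
--     for i in range(rank-1, -1, -1): # Check up
--         if board[i*8 + file] == '':
--             valid_moves.append(i*8 + file)
--         elif (color and board[i*8 + file].islower()) or (not color and board[i*8 + file].isupper()):
--             valid_moves.append(i*8 + file)
--             break
--         else:
--             break
--     for i in range(rank+1, 8): # Check down
--         if board[i*8 + file] == '':
--             valid_moves.append(i*8 + file)
--         elif (color and board[i*8 + file].islower()) or (not color and board[i*8 + file].isupper()):
--             valid_moves.append(i*8 + file)
--             break
--         else:
--             break
--
--     # Check valid moves in the diagonal direction
--     for i, j in [(1, 1), (-1, -1), (-1, 1), (1, -1)]: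
--         for k in range(1, 8):
--             r = rank + k*i
--             f = file + k*j
--             if r < 0 or r > 7 or f < 0 or f > 7:
--                 break
--             if board[r*8 + f] == '':
--                 valid_moves.append(r*8 + f)
--             elif (color and board[r*8 + f].islower()) or (not color and board[r*8 + f].isupper()):
--                 valid_moves.append(r*8 + f)
--                 break
--             else:
--                 break
--
--     return valid_moves
-- ===== SOURCE B (Python) =====
-- def get_valid_moves_for_queen(board, index):
--     """Staged rewrite: build the queen's eight rays as square lists (range
--     comprehensions for rank/file, a bounded coordinate walk for the diagonals),
--     then for each ray locate the first occupied square and emit the empty prefix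
--     by slicing plus the blocker itself when it holds an enemy piece."""
--     color = board[index].isupper()
--     rank, file = divmod(index, 8)
--     rays = [
--         [rank * 8 + f for f in range(file - 1, -1, -1)],   # left
--         [rank * 8 + f for f in range(file + 1, 8)],        # right
--         [r * 8 + file for r in range(rank - 1, -1, -1)],   # up
--         [r * 8 + file for r in range(rank + 1, 8)],        # down
--     ]
--     for dr, df in ((1, 1), (-1, -1), (-1, 1), (1, -1)):    # diagonals
--         ray = []
--         r, f = rank + dr, file + df
--         while 0 <= r <= 7 and 0 <= f <= 7 and len(ray) < 7:
--             ray.append(r * 8 + f)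
--             r, f = r + dr, f + df
--         rays.append(ray)
--     moves = []
--     for ray in rays:
--         # position of the first occupied square on the ray (len(ray) if none)
--         stop = next((k for k, sq in enumerate(ray) if board[sq] != ''), len(ray))
--         moves += ray[:stop]
--         if stop < len(ray):
--             blocker = board[ray[stop]]
--             if blocker.islower() if color else blocker.isupper():
--                 moves.append(ray[stop])
--     return moves
-- ===== Notes on version B (the rewrite author's own statement) =====
-- stated objective: simpler
-- what changed: Replaces A's four inline orthogonal range-loops and the diagonal double-loop, each repeating per-square append/break capture logic, by a staged pass: build the eight rays as square lists (range comprehensions plus a bounded diagonal coordinate walk), then per ray find the first occupied square with next() and emit the empty prefix by slicing plus the blocker when it is an enemy.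
import Mathlib
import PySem

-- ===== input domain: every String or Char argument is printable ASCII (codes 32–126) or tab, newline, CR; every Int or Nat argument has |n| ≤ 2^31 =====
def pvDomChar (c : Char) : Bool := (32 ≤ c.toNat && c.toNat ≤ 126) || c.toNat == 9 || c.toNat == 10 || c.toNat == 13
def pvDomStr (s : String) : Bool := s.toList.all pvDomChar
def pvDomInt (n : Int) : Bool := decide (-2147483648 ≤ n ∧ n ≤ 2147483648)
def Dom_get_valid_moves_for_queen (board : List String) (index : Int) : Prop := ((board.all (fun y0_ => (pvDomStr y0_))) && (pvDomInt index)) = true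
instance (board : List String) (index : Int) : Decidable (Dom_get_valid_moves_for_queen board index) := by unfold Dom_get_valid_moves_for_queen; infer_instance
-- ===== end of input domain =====

-- B builds the eight rays as square lists (range comprehensions, a bounded coordinate
-- walk for the diagonals) and then, per ray, locates the first occupied square and emits
-- the empty prefix by slicing plus the blocker when it is an enemy, replacing A's four
-- inline per-square append/break loops and diagonal double-loop (objective: simpler).

-- ===== PORT A =====

-- Python str.isupper()/str.islower(): at least one cased char and every cased char
-- upper (resp. lower); exact on the ASCII domain (cased = letters), via PySem.Chars.
def pvStrIsupper (s : String) : Bool :=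
  (s.toList.any fun c => PySem.Chars.isalpha c) && (s.toList.all fun c => !(PySem.Chars.islower c))
def pvStrIslower (s : String) : Bool :=
  (s.toList.any fun c => PySem.Chars.isalpha c) && (s.toList.all fun c => !(PySem.Chars.isupper c))

-- board[i] with Python index semantics (negative i from the end); Python raises
-- IndexError where pyGet? is none — those inputs are outside Pre_.
def pvCell (board : List String) (i : Int) : String := (PySem.List.pyGet? board i).getD ""

-- A's horizontal `for i in range(...)` loops: iterate over the i-range, square rank*8+i
def hscanA (board : List String) (color : Bool) (rank : Int) : List Int → List Int
  | [] => []
  | i :: rest =>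
    let c := pvCell board (rank * 8 + i)
    if c = "" then (rank * 8 + i) :: hscanA board color rank rest
    else if (color && pvStrIslower c) || (!color && pvStrIsupper c) then [rank * 8 + i]
    else []

-- A's vertical `for i in range(...)` loops: iterate over the i-range, square i*8+file
def vscanA (board : List String) (color : Bool) (file : Int) : List Int → List Int
  | [] => []
  | i :: rest =>
    let c := pvCell board (i * 8 + file)
    if c = "" then (i * 8 + file) :: vscanA board color file rest
    else if (color && pvStrIslower c) || (!color && pvStrIsupper c) then [i * 8 + file]
    else []

-- A's inner diagonal loop `for k in range(1, 8)` for one direction pair (i, j)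
def diagA (board : List String) (color : Bool) (rank file i j : Int) : List Int → List Int
  | [] => []
  | k :: rest =>
    let r := rank + k * i
    let f := file + k * j
    if r < 0 ∨ 7 < r ∨ f < 0 ∨ 7 < f then []
    else
      let c := pvCell board (r * 8 + f)
      if c = "" then (r * 8 + f) :: diagA board color rank file i j rest
      else if (color && pvStrIslower c) || (!color && pvStrIsupper c) then [r * 8 + f]
      else []

def get_valid_moves_for_queen (board : List String) (index : Int) : List Int :=
  let color := pvStrIsupper (pvCell board index)
  let rank := PySem.Int.floordiv index 8
  let file := PySem.Int.mod index 8
  let _direction : Int := if color then -1 else 1   -- A computes this but never uses it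
  hscanA board color rank (PySem.List.pyRange (file - 1) (-1) (-1)) ++
  hscanA board color rank (PySem.List.pyRange (file + 1) 8 1) ++
  vscanA board color file (PySem.List.pyRange (rank - 1) (-1) (-1)) ++
  vscanA board color file (PySem.List.pyRange (rank + 1) 8 1) ++
  ([(1, 1), (-1, -1), (-1, 1), (1, -1)] : List (Int × Int)).foldl
    (fun acc p => acc ++ diagA board color rank file p.1 p.2 (PySem.List.pyRange 1 8 1)) []

-- ===== PORT B =====

-- Source B's diagonal `while 0 <= r <= 7 and 0 <= f <= 7 and len(ray) < 7` walk; the fuel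
-- argument is exactly the remaining `7 - len(ray)` budget of that loop condition.
def walkB (dr df : Int) : Nat → Int → Int → List Int
  | 0, _, _ => []
  | n + 1, r, f =>
    if 0 ≤ r ∧ r ≤ 7 ∧ 0 ≤ f ∧ f ≤ 7 then (r * 8 + f) :: walkB dr df n (r + dr) (f + df)
    else []

-- Source B's `next((k for k, sq in enumerate(ray) if board[sq] != ''), len(ray))`
def firstStop (board : List String) : List Int → Nat
  | [] => 0
  | sq :: rest => if pvCell board sq = "" then firstStop board rest + 1 else 0

-- Source B's per-ray emission: moves += ray[:stop]; capture check on ray[stop] if any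
def emitB (board : List String) (color : Bool) (moves ray : List Int) : List Int :=
  let stop := firstStop board ray
  let m1 := moves ++ ray.take stop
  if stop < ray.length then
    let blocker := pvCell board (ray.getD stop 0)
    if (if color then pvStrIslower blocker else pvStrIsupper blocker) then m1 ++ [ray.getD stop 0]
    else m1
  else m1

def get_valid_moves_for_queen_alt (board : List String) (index : Int) : List Int :=
  let color := pvStrIsupper (pvCell board index)
  let rank := PySem.Int.floordiv index 8
  let file := PySem.Int.mod index 8
  let rays :=
    ([((1:Int), (1:Int)), (-1, -1), (-1, 1), (1, -1)] : List (Int × Int)).foldl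
      (fun rs d => rs ++ [walkB d.1 d.2 7 (rank + d.1) (file + d.2)])
      [(PySem.List.pyRange (file - 1) (-1) (-1)).map (fun f => rank * 8 + f),
       (PySem.List.pyRange (file + 1) 8 1).map (fun f => rank * 8 + f),
       (PySem.List.pyRange (rank - 1) (-1) (-1)).map (fun r => r * 8 + file),
       (PySem.List.pyRange (rank + 1) 8 1).map (fun r => r * 8 + file)]
  rays.foldl (fun moves ray => emitB board color moves ray) []

-- ===== PRECONDITION & SPEC =====

-- i is a valid Python index of board (board[i] does not raise IndexError)
def pvIdxOk (board : List String) (i : Int) : Bool :=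
  -(board.length : Int) ≤ i && i < (board.length : Int)

-- the scan along one ray's square list never reads past the board: every square whose
-- predecessors on the ray are all valid Python indices holding "" is itself a valid index
def pvWalkSafe (board : List String) (sqs : List Int) : Bool :=
  (List.range sqs.length).all fun k =>
    !((List.range k).all fun j => pvIdxOk board (sqs.getD j 4) && ((PySem.List.pyGet? board (sqs.getD j 4)).getD "" == ""))
    || pvIdxOk board (sqs.getD k 4)  -- getD's default (4) is arbitrary: j, k < sqs.length

-- the same for a diagonal, whose k-th square is read only while every step up to k stays
-- on the 8x8 board (the loop's bounds check)
def pvDiagSafe (board : List String) (rank file dr df : Int) : Bool :=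
  (PySem.List.pyRange 1 8 1).all fun k =>
    !(((PySem.List.pyRange 1 (k + 1) 1).all fun j =>
        decide (0 ≤ rank + j * dr) && decide (rank + j * dr ≤ 7) &&
        decide (0 ≤ file + j * df) && decide (file + j * df ≤ 7)) &&
      ((PySem.List.pyRange 1 k 1).all fun j =>
        pvIdxOk board ((rank + j * dr) * 8 + (file + j * df)) &&
        ((PySem.List.pyGet? board ((rank + j * dr) * 8 + (file + j * df))).getD "" == "")))
    || pvIdxOk board ((rank + k * dr) * 8 + (file + k * df))

-- all eight ray scans from (rank, file) stay on the board
def pvRaysSafe (board : List String) (rank file : Int) : Bool :=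
  pvWalkSafe board ((PySem.List.pyRange (file - 1) (-1) (-1)).map (fun i => rank * 8 + i)) &&
  pvWalkSafe board ((PySem.List.pyRange (file + 1) 8 1).map (fun i => rank * 8 + i)) &&
  pvWalkSafe board ((PySem.List.pyRange (rank - 1) (-1) (-1)).map (fun i => i * 8 + file)) &&
  pvWalkSafe board ((PySem.List.pyRange (rank + 1) 8 1).map (fun i => i * 8 + file)) &&
  pvDiagSafe board rank file 1 1 && pvDiagSafe board rank file (-1) (-1) &&
  pvDiagSafe board rank file (-1) 1 && pvDiagSafe board rank file 1 (-1)

-- Pre_ excludes exactly the inputs on which A raises IndexError: index not a valid Python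
-- index of board, or one of the eight ray scans reading past the board's length over
-- valid empty squares.
def Pre_get_valid_moves_for_queen (board : List String) (index : Int) : Prop :=
  pvIdxOk board index = true ∧
  pvRaysSafe board (PySem.Int.floordiv index 8) (PySem.Int.mod index 8) = true
instance (board : List String) (index : Int) : Decidable (Pre_get_valid_moves_for_queen board index) := by
  unfold Pre_get_valid_moves_for_queen; infer_instance

def pvWitness_get_valid_moves_for_queen : List String × Int := (["p", "p", "p", "p", "p", "p", "p", "Q"], -1)

def Spec_get_valid_moves_for_queen (board : List String) (index : Int) (out : List Int) : Prop := out = get_valid_moves_for_queen_alt board index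
instance (board : List String) (index : Int) (out : List Int) : Decidable (Spec_get_valid_moves_for_queen board index out) := by unfold Spec_get_valid_moves_for_queen; infer_instance

-- ===== CLAIM (what is proved, stated in full; the proofs are below) =====
def Claim_equal_get_valid_moves_for_queen : Prop := ∀ (board : List String) (index : Int), Dom_get_valid_moves_for_queen board index → Pre_get_valid_moves_for_queen board index → Spec_get_valid_moves_for_queen board index (get_valid_moves_for_queen board index)

-- ===== LEMMAS AND PROOFS =====

-- the common per-square blocker/capture scan both sides reduce to
def scanG (board : List String) (color : Bool) : List Int → List Int
  | [] => []
  | sq :: rest =>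
    let c := pvCell board sq
    if c = "" then sq :: scanG board color rest
    else if (color && pvStrIslower c) || (!color && pvStrIsupper c) then [sq]
    else []

theorem emitB_eq (board : List String) (color : Bool) :
    ∀ ray moves : List Int, emitB board color moves ray = moves ++ scanG board color ray := by
  intro ray
  induction ray with
  | nil => intro moves; simp [emitB, firstStop, scanG]
  | cons sq rest ih =>
    intro moves
    by_cases hc : pvCell board sq = ""
    · have : emitB board color moves (sq :: rest) = emitB board color (moves ++ [sq]) rest := by
        simp [emitB, firstStop, hc, List.take_succ_cons]
      rw [this, ih, scanG]
      simp [hc]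
    · cases color <;>
        simp [emitB, firstStop, hc, scanG] <;>
        by_cases he : pvStrIsupper (pvCell board sq) <;>
        by_cases hl : pvStrIslower (pvCell board sq) <;> simp [he, hl]

theorem hscanA_eq (board : List String) (color : Bool) (rank : Int) :
    ∀ is : List Int, hscanA board color rank is = scanG board color (is.map (fun i => rank * 8 + i)) := by
  intro is
  induction is with
  | nil => rfl
  | cons i rest ih => cases color <;> simp [List.map, scanG, hscanA, ih]

theorem vscanA_eq (board : List String) (color : Bool) (file : Int) :
    ∀ is : List Int, vscanA board color file is = scanG board color (is.map (fun i => i * 8 + file)) := by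
  intro is
  induction is with
  | nil => rfl
  | cons i rest ih => cases color <;> simp [List.map, scanG, vscanA, ih]

-- A's diagonal squares as a pure list (the scan logic factored out)
def diagSq (rank file i j : Int) : List Int → List Int
  | [] => []
  | k :: rest =>
    if rank + k * i < 0 ∨ 7 < rank + k * i ∨ file + k * j < 0 ∨ 7 < file + k * j then []
    else ((rank + k * i) * 8 + (file + k * j)) :: diagSq rank file i j rest

theorem diagA_eq (board : List String) (color : Bool) (rank file i j : Int) :
    ∀ ks : List Int, diagA board color rank file i j ks = scanG board color (diagSq rank file i j ks) := by
  intro ks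
  induction ks with
  | nil => rfl
  | cons k rest ih =>
    by_cases h : rank + k * i < 0 ∨ 7 < rank + k * i ∨ file + k * j < 0 ∨ 7 < file + k * j
    · simp [diagA, diagSq, h, scanG]
    · cases color <;> simp [diagA, diagSq, h, scanG, ih]

-- B's bounded diagonal walk produces, for every start square, exactly the square list
-- A's `for k in range(1, 8)` diagonal loop traverses (its step budget counts down from 8)
theorem walkB_diagSq (i j rank file : Int) :
    ∀ (n : Nat) (k : Int), k = 8 - n →
      walkB i j n (rank + k * i) (file + k * j) = diagSq rank file i j (PySem.List.pyRange k 8 1) := by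
  intro n
  induction n with
  | zero =>
    intro k hk
    have : PySem.List.pyRange k 8 1 = [] := PySem.List.pyRange_one_eq_nil (by omega)
    simp [walkB, this, diagSq]
  | succ n ih =>
    intro k hk
    rw [PySem.List.pyRange_one_cons (by omega)]
    by_cases h : rank + k * i < 0 ∨ 7 < rank + k * i ∨ file + k * j < 0 ∨ 7 < file + k * j
    · have hb : ¬ (0 ≤ rank + k * i ∧ rank + k * i ≤ 7 ∧ 0 ≤ file + k * j ∧ file + k * j ≤ 7) := by omega
      simp [walkB, diagSq, h, hb]
    · have hb : 0 ≤ rank + k * i ∧ rank + k * i ≤ 7 ∧ 0 ≤ file + k * j ∧ file + k * j ≤ 7 := by omega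
      have hrec : rank + k * i + i = rank + (k + 1) * i := by ring
      have hfrec : file + k * j + j = file + (k + 1) * j := by ring
      simp only [walkB, if_pos hb, diagSq, if_neg h, hrec, hfrec]
      rw [ih (k + 1) (by omega)]

theorem walkB_diag7 (i j rank file : Int) :
    walkB i j 7 (rank + i) (file + j) = diagSq rank file i j (PySem.List.pyRange 1 8 1) := by
  have h := walkB_diagSq i j rank file 7 1 (by norm_num)
  simpa using h

-- ===== VERDICT (by name: the statement is the Claim_ definition above) =====
theorem get_valid_moves_for_queen_spec : Claim_equal_get_valid_moves_for_queen := by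
  intro board index _hdom _hpre
  unfold Spec_get_valid_moves_for_queen get_valid_moves_for_queen get_valid_moves_for_queen_alt
  simp only [List.foldl, List.nil_append, List.cons_append, List.append_assoc]
  simp only [walkB_diag7, emitB_eq, hscanA_eq, vscanA_eq, diagA_eq,
    List.nil_append, List.append_assoc]
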